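-- pv_equiv track=rewrite | github.com/CCCKW/mHapTk | build/lib/src/mhaptk.py | E4
-- ===== SOURCE A (Python) =====
-- def E4(r):
--     result = {}
--     for i in range(len(r)):
--         result[i] = {}
--
--     for i in range(len(r) - 3):
--         frac = r[i:i + 4]
--         for j in range(i, i + 4):
--             try:
--                 result[j][frac] += 1
--             except:
--                 result[j][frac] = 1
--     return result
-- ===== SOURCE B (Python) =====
-- def _window_counts(r, j, n):
--     # counts of the 4-mers r[i:i+4] over the windows i that cover position j
--     d = {}
--     for i in range(max(0, j - 3), min(j, n - 4) + 1):
--         frac = r[i:i + 4]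
--         d[frac] = d.get(frac, 0) + 1
--     return d
--
-- def E4(r):
--     n = len(r)
--     return {j: _window_counts(r, j, n) for j in range(n)}
-- ===== Notes on version B (the rewrite author's own statement) =====
-- stated objective: alternative
-- what changed: Transposed the loop from scatter to gather: instead of pushing each 4-mer window's count into the four position-dicts it covers, B builds each position's dict independently by iterating exactly over the windows that cover that position.
import Mathlib
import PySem

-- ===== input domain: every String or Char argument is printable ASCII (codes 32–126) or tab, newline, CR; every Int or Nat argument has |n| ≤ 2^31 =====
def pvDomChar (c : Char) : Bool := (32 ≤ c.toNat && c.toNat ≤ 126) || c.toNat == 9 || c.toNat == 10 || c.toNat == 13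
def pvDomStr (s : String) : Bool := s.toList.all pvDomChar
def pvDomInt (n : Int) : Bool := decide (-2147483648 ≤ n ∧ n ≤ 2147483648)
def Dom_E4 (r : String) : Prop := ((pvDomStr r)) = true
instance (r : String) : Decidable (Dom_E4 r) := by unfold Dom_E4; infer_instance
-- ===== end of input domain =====

-- B gathers each position's 4-mer counts from the windows covering it, instead of A's scatter over window positions; same cost, different decomposition.

-- r[i:i+4] (shared slicing primitive)
def pvFrac (r : String) (i : Int) : String :=
  String.ofList (PySem.List.slice r.toList (some i) (some (i + 4)))

-- ===== PORT A =====
def E4 (r : String) : List (Int × List (String × Int)) :=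
  let n : Int := PySem.Str.len r
  -- result = {}; for i in range(len(r)): result[i] = {}
  let d0 : PySem.Dict Int (PySem.Dict String Int) :=
    (PySem.List.pyRange 0 n 1).foldl (fun d i => d.insert i PySem.Dict.empty) PySem.Dict.empty
  -- for i in range(len(r)-3): frac = r[i:i+4]; for j in range(i, i+4): result[j][frac] += 1 (or = 1 on KeyError)
  let d : PySem.Dict Int (PySem.Dict String Int) :=
    (PySem.List.pyRange 0 (n - 3) 1).foldl (fun d i =>
      (PySem.List.pyRange i (i + 4) 1).foldl
        (fun d j => d.modify j PySem.Dict.empty (fun inner => inner.modify (pvFrac r i) 0 (· + 1))) d) d0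
  d.items.map (fun p => (p.1, p.2.items))

-- ===== PORT B =====
-- _window_counts(r, j, n)
def pvWindowCounts (r : String) (j n : Int) : PySem.Dict String Int :=
  (PySem.List.pyRange (max 0 (j - 3)) (min j (n - 4) + 1) 1).foldl
    (fun d i => d.insert (pvFrac r i) (d.getD (pvFrac r i) 0 + 1)) PySem.Dict.empty

def E4_alt (r : String) : List (Int × List (String × Int)) :=
  let n : Int := PySem.Str.len r
  (PySem.List.pyRange 0 n 1).map (fun j => (j, (pvWindowCounts r j n).items))

-- ===== PRECONDITION & SPEC =====
def Spec_E4 (r : String) (out : List (Int × List (String × Int))) : Prop := out = E4_alt r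
instance (r : String) (out : List (Int × List (String × Int))) : Decidable (Spec_E4 r out) := by unfold Spec_E4; infer_instance

-- ===== CLAIM (what is proved, stated in full; the proofs are below) =====
def Claim_equal_E4 : Prop := ∀ (r : String), Dom_E4 r → Spec_E4 r (E4 r)

-- ===== LEMMAS AND PROOFS =====

-- one window of A: only the four covered positions j (i ≤ j ≤ i+3) get their inner dict updated
theorem pv_window_getD (d : PySem.Dict Int (PySem.Dict String Int)) (i j : Int)
    (f : PySem.Dict String Int → PySem.Dict String Int) :
    ((PySem.List.pyRange i (i + 4) 1).foldl
        (fun d jj => d.modify jj PySem.Dict.empty f) d).getD j PySem.Dict.empty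
      = if j - 3 ≤ i ∧ i ≤ j then f (d.getD j PySem.Dict.empty)
        else d.getD j PySem.Dict.empty := by
  rw [PySem.List.pyRange_one_cons (by omega), PySem.List.pyRange_one_cons (by omega),
      PySem.List.pyRange_one_cons (by omega), PySem.List.pyRange_one_cons (by omega),
      PySem.List.pyRange_one_eq_nil (by omega)]
  simp only [List.foldl, PySem.Dict.getD_modify]
  split_ifs <;> first | rfl | omega | (subst_vars; rfl)

-- A's nested scatter loop, read at one position j, is the per-position conditional loop
theorem pv_scatter_getD (r : String) (ws : List Int)
    (d : PySem.Dict Int (PySem.Dict String Int)) (j : Int) :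
    ((ws.foldl (fun d i =>
        (PySem.List.pyRange i (i + 4) 1).foldl
          (fun d jj => d.modify jj PySem.Dict.empty
            (fun inner => inner.modify (pvFrac r i) 0 (· + 1))) d) d).getD j PySem.Dict.empty)
      = ws.foldl (fun inner i =>
          if j - 3 ≤ i ∧ i ≤ j then inner.modify (pvFrac r i) 0 (· + 1) else inner)
          (d.getD j PySem.Dict.empty) := by
  induction ws generalizing d with
  | nil => rfl
  | cons i t ih =>
    simp only [List.foldl]
    rw [ih, pv_window_getD]

-- after the initialisation loop every position reads the empty inner dict
theorem pv_init_getD (l : List Int) (d : PySem.Dict Int (PySem.Dict String Int))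
    (h : ∀ j, d.getD j PySem.Dict.empty = PySem.Dict.empty) (j : Int) :
    ((l.foldl (fun d i => d.insert i PySem.Dict.empty) d).getD j PySem.Dict.empty)
      = PySem.Dict.empty := by
  induction l generalizing d with
  | nil => exact h j
  | cons x t ih =>
    simp only [List.foldl]
    refine ih _ (fun j => ?_)
    rw [PySem.Dict.getD_insert]
    split
    · rfl
    · exact h j

-- inserting a key (with any value) adds it to the key set
theorem pv_keys_insert (d : PySem.Dict Int (PySem.Dict String Int)) (x : Int) :
    (d.insert x PySem.Dict.empty).keys = PySem.Set.add d.keys x := by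
  by_cases h : d.contains x = true
  · rw [PySem.Dict.keys_insert_of_contains _ _ h]
    simp [PySem.Set.add, PySem.Set.contains, (PySem.Dict.contains_iff_mem_keys _ _).mp h]
  · rw [PySem.Dict.keys_insert_of_not_contains _ _ (by simpa using h)]
    have hm : ¬ x ∈ d.keys := fun hm => h ((PySem.Dict.contains_iff_mem_keys _ _).mpr hm)
    simp [PySem.Set.add, PySem.Set.contains, hm]

-- keys of the initialisation loop
theorem pv_keys_init (l : List Int) (d : PySem.Dict Int (PySem.Dict String Int)) :
    (l.foldl (fun d i => d.insert i PySem.Dict.empty) d).keys = PySem.Set.update d.keys l := by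
  induction l generalizing d with
  | nil => rfl
  | cons x t ih =>
    simp only [List.foldl, PySem.Set.update]
    rw [ih, pv_keys_insert]
    rfl

-- updating keys that are already present does not change the key set
theorem pv_set_update_self (xs : List Int) (s : List Int) (h : ∀ x ∈ xs, x ∈ s) :
    PySem.Set.update s xs = s := by
  induction xs generalizing s with
  | nil => rfl
  | cons x t ih =>
    have hx : PySem.Set.add s x = s := by
      simp [PySem.Set.add, PySem.Set.contains, h x (by simp)]
    simp only [PySem.Set.update, List.foldl]
    rw [show List.foldl PySem.Set.add (PySem.Set.add s x) t
          = PySem.Set.update (PySem.Set.add s x) t from rfl, hx]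
    exact ih s (fun y hy => h y (by simp [hy]))

-- keys of A's result dict stay exactly the positions 0..n-1, in order
theorem pv_keys_final (r : String) (ws : List Int) (n : Int)
    (d : PySem.Dict Int (PySem.Dict String Int)) (hk : d.keys = PySem.List.pyRange 0 n 1)
    (hws : ∀ i ∈ ws, 0 ≤ i ∧ i + 3 < n) :
    (ws.foldl (fun d i =>
        (PySem.List.pyRange i (i + 4) 1).foldl
          (fun d jj => d.modify jj PySem.Dict.empty
            (fun inner => inner.modify (pvFrac r i) 0 (· + 1))) d) d).keys
      = PySem.List.pyRange 0 n 1 := by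
  induction ws generalizing d with
  | nil => exact hk
  | cons i t ih =>
    simp only [List.foldl]
    refine ih _ ?_ (fun x hx => hws x (by simp [hx]))
    rw [PySem.Dict.keys_foldl_modify, hk]
    refine pv_set_update_self _ _ (fun x hx => ?_)
    rw [PySem.List.mem_pyRange_one] at hx ⊢
    have := hws i (by simp)
    omega

-- Source B's 'd[frac] = d.get(frac, 0) + 1' is exactly a counting modify
theorem pv_insert_getD (d : PySem.Dict String Int) (k : String) :
    d.insert k (d.getD k 0 + 1) = d.modify k 0 (· + 1) := rfl

-- the elements of range(a, b) lying in [c, e] form the contiguous subrange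
theorem pv_filter_pyRange (a b c e : Int) :
    (PySem.List.pyRange a b 1).filter (fun i => decide (c ≤ i ∧ i ≤ e))
      = PySem.List.pyRange (max a c) (min b (e + 1)) 1 := by
  induction hn : (b - a).toNat generalizing a with
  | zero =>
    rw [PySem.List.pyRange_one_eq_nil (by omega), PySem.List.pyRange_one_eq_nil (by omega)]
    rfl
  | succ m ih =>
    rw [PySem.List.pyRange_one_cons (by omega), List.filter_cons]
    by_cases h : c ≤ a ∧ a ≤ e
    · rw [if_pos (by simpa using h), ih (a + 1) (by omega),
        show max a c = a from by omega]
      conv_rhs => rw [PySem.List.pyRange_one_cons (show a < min b (e + 1) by omega)]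
      rw [show max (a + 1) c = a + 1 from by omega]
    · rw [if_neg (by simpa using h), ih (a + 1) (by omega)]
      by_cases hc : c ≤ a
      · rw [PySem.List.pyRange_one_eq_nil (by omega), PySem.List.pyRange_one_eq_nil (by omega)]
      · congr 1
        omega

-- per-position equality: what A scatters onto position j is B's gathered window count
theorem pv_inner_eq (r : String) (n j : Int) :
    ((PySem.List.pyRange 0 (n - 3) 1).foldl (fun inner i =>
        if j - 3 ≤ i ∧ i ≤ j then inner.modify (pvFrac r i) 0 (· + 1) else inner)
        PySem.Dict.empty)
      = pvWindowCounts r j n := by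
  rw [PySem.List.foldl_ite_eq_foldl_filter, pv_filter_pyRange]
  unfold pvWindowCounts
  rw [show min (n - 3) (j + 1) = min j (n - 4) + 1 from by omega]
  exact PySem.List.foldl_congr_mem _ _ _ _ (fun acc x _ => (pv_insert_getD acc (pvFrac r x)).symm)

-- the items of A's final dict are B's per-position window counts, in position order
theorem pv_items_final (r : String) (n : Int) :
    ((PySem.List.pyRange 0 (n - 3) 1).foldl (fun d i =>
        (PySem.List.pyRange i (i + 4) 1).foldl
          (fun d j => d.modify j PySem.Dict.empty
            (fun inner => inner.modify (pvFrac r i) 0 (· + 1))) d)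
      ((PySem.List.pyRange 0 n 1).foldl (fun d i => d.insert i PySem.Dict.empty)
        PySem.Dict.empty)).items
    = (PySem.List.pyRange 0 n 1).map (fun j => (j, pvWindowCounts r j n)) := by
  have hkeys0 : ((PySem.List.pyRange 0 n 1).foldl (fun d i => d.insert i PySem.Dict.empty)
      (PySem.Dict.empty : PySem.Dict Int (PySem.Dict String Int))).keys
      = PySem.List.pyRange 0 n 1 := by
    rw [pv_keys_init, PySem.Dict.keys_empty]
    exact PySem.Set.ofList_eq_self_of_nodup _ (PySem.List.nodup_pyRange_one 0 n)
  have hkeys := pv_keys_final r (PySem.List.pyRange 0 (n - 3) 1) n _ hkeys0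
    (fun i hi => by rw [PySem.List.mem_pyRange_one] at hi; omega)
  rw [PySem.Dict.items_eq_map_keys _
        (by rw [hkeys]; exact PySem.List.nodup_pyRange_one 0 n) PySem.Dict.empty, hkeys]
  refine List.map_congr_left (fun j _ => ?_)
  rw [pv_scatter_getD, pv_init_getD _ _ (fun j => PySem.Dict.getD_empty _ _) j]
  rw [pv_inner_eq]

-- ===== VERDICT (by name: the statement is the Claim_ definition above) =====
theorem E4_spec : Claim_equal_E4 := by
  intro r _
  show E4 r = E4_alt r
  simp only [E4, E4_alt]
  rw [pv_items_final r (PySem.Str.len r), List.map_map]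
  rfl
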